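-- pv_equiv track=rewrite | github.com/Sebastian-Narvaez117/Lenguajes-Formales | practica2/Front.py | analizar_crecimiento
-- ===== SOURCE A (Python) =====
-- def kleene_star(L, max_iter):
--     resultado = [""]
--     actual = [""]
--
--     for _ in range(max_iter):
--         nuevo = []
--         for x in actual:
--             for y in L:
--                 nuevo.append(x + y)
--
--         resultado = list(set(resultado + nuevo))
--         actual = nuevo
--
--     return resultado
--
-- def analizar_crecimiento(L, max_iter=5):
--     lineas = []
--
--     for i in range(1, max_iter + 1):
--         resultado = kleene_star(L, i)
--         resultado_ordenado = sorted(resultado, key=lambda x: (len(x), x))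
--         lineas.append(f"Iteracion: {i}")
--         lineas.append(f"Cantidad: {len(resultado)}")
--         lineas.append("Crecimiento:")
--         for cadena in resultado_ordenado:
--             lineas.append(f"  {cadena!r}")
--         lineas.append("")
--
--     return "\n".join(lineas)
-- ===== SOURCE B (Python) =====
-- def analizar_crecimiento(L, max_iter=5):
--     # Single incremental pass: cumulative set + deduplicated frontier,
--     # never recomputing earlier Kleene-star levels.
--     lineas = []
--     resultado = {""}
--     actual = {""}
--     for i in range(1, max_iter + 1):
--         actual = {x + y for x in actual for y in L}
--         resultado |= actual
--         lineas.append(f"Iteracion: {i}")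
--         lineas.append(f"Cantidad: {len(resultado)}")
--         lineas.append("Crecimiento:")
--         for cadena in sorted(resultado, key=lambda s: (len(s), s)):
--             lineas.append(f"  {cadena!r}")
--         lineas.append("")
--     return "\n".join(lineas)
-- ===== Notes on version B (the rewrite author's own statement) =====
-- stated objective: alternative
-- what changed: B merges kleene_star and the report loop into one incremental pass that carries a cumulative set and a deduplicated frontier across iterations, instead of recomputing the whole Kleene-star from scratch for every i; the emitted report (which itself is exponential in max_iter) is identical, so overall cost stays dominated by printing.
import Mathlib
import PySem

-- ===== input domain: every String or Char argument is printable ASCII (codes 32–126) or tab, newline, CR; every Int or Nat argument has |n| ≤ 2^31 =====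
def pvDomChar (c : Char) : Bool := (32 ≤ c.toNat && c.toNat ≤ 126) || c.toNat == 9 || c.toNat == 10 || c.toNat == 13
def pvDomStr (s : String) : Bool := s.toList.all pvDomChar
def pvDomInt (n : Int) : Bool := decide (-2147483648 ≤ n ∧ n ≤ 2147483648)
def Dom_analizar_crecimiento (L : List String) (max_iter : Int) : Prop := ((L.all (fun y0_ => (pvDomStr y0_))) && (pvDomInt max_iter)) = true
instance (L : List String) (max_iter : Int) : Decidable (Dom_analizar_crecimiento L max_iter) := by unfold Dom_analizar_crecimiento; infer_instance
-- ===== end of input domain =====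

-- B merges the two functions into one incremental pass (cumulative set + deduplicated
-- frontier carried across iterations) instead of recomputing kleene_star(L, i) from
-- scratch for every i; objective: alternative decomposition, same asymptotic cost.

-- Shared helpers for Python string built-ins both programs use:
-- Python 'x + y' on str (exact)
def pvStrCat (x y : String) : String := String.mk (x.toList ++ y.toList)

-- Python repr(s): helpers; exact on the Dom charset (printable ASCII 32–126, tab, newline, CR)
def pvReprQuote (cs : List Char) : Char :=
  if cs.contains '\'' && !cs.contains '"' then '"' else '\''

def pvReprEsc (q : Char) : List Char → List Char
  | [] => []
  | c :: cs =>
    (if c = '\\' then ['\\', '\\']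
     else if c = q then ['\\', q]
     else if c = '\t' then ['\\', 't']
     else if c = '\n' then ['\\', 'n']
     else if c = '\r' then ['\\', 'r']
     else [c]) ++ pvReprEsc q cs

def pvRepr (s : String) : String :=
  let cs := s.toList
  let q := pvReprQuote cs
  String.mk (q :: (pvReprEsc q cs ++ [q]))

-- ===== PORT A =====
def kleene_star (L : List String) (max_iter : Int) : List String :=
  let st :=
    (PySem.List.pyRange 0 max_iter 1).foldl
      (fun (st : List String × List String) _ =>
        let nuevo := st.2.foldl
          (fun nuevo x => L.foldl (fun nuevo y => nuevo ++ [pvStrCat x y]) nuevo) []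
        (PySem.Set.ofList (st.1 ++ nuevo), nuevo))
      ([""], [""])
  st.1

def analizar_crecimiento (L : List String) (max_iter : Int) : String :=
  let lineas :=
    (PySem.List.pyRange 1 (max_iter + 1) 1).foldl
      (fun (lineas : List String) i =>
        let resultado := kleene_star L i
        let resultado_ordenado :=
          PySem.List.sorted2 resultado (fun x => PySem.Str.len x) (fun x => x) false
        let lineas := lineas ++ [pvStrCat "Iteracion: " (PySem.Int.toStr i)]
        let lineas := lineas ++ [pvStrCat "Cantidad: " (PySem.Int.toStr (resultado.length : Int))]
        let lineas := lineas ++ ["Crecimiento:"]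
        let lineas := resultado_ordenado.foldl
          (fun lineas cadena => lineas ++ [pvStrCat "  " (pvRepr cadena)]) lineas
        lineas ++ [""])
      []
  PySem.Str.join "\n" lineas

-- ===== PORT B =====
def analizar_crecimiento_alt (L : List String) (max_iter : Int) : String :=
  let st :=
    (PySem.List.pyRange 1 (max_iter + 1) 1).foldl
      (fun (st : List String × PySem.Set String × PySem.Set String) i =>
        let lineas := st.1
        let resultado := st.2.1
        let actual := st.2.2
        let actual := PySem.Set.ofList (actual.flatMap (fun x => L.map (fun y => pvStrCat x y)))
        let resultado := PySem.Set.union resultado actual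
        let lineas := lineas ++ [pvStrCat "Iteracion: " (PySem.Int.toStr i)]
        let lineas := lineas ++ [pvStrCat "Cantidad: " (PySem.Int.toStr (PySem.Set.len resultado))]
        let lineas := lineas ++ ["Crecimiento:"]
        let lineas :=
          (PySem.List.sorted2 resultado (fun s => PySem.Str.len s) (fun s => s) false).foldl
            (fun lineas cadena => lineas ++ [pvStrCat "  " (pvRepr cadena)]) lineas
        (lineas ++ [""], resultado, actual))
      ([], PySem.Set.ofList [""], PySem.Set.ofList [""])
  PySem.Str.join "\n" st.1

-- ===== PRECONDITION & SPEC =====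
def Spec_analizar_crecimiento (L : List String) (max_iter : Int) (out : String) : Prop := out = analizar_crecimiento_alt L max_iter
instance (L : List String) (max_iter : Int) (out : String) : Decidable (Spec_analizar_crecimiento L max_iter out) := by unfold Spec_analizar_crecimiento; infer_instance

-- ===== CLAIM (what is proved, stated in full; the proofs are below) =====
def Claim_equal_analizar_crecimiento : Prop := ∀ (L : List String) (max_iter : Int), Dom_analizar_crecimiento L max_iter → Spec_analizar_crecimiento L max_iter (analizar_crecimiento L max_iter)

-- ===== LEMMAS AND PROOFS =====

-- one concatenation step on a frontier
def pvStep (L : List String) (act : List String) : List String :=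
  act.flatMap (fun x => L.map (fun y => pvStrCat x y))

-- A's frontier and cumulative list after n iterations of kleene_star's loop
def pvLvlA (L : List String) : Nat → List String
  | 0 => [""]
  | n + 1 => pvStep L (pvLvlA L n)

def pvResA (L : List String) : Nat → List String
  | 0 => [""]
  | n + 1 => PySem.Set.ofList (pvResA L n ++ pvLvlA L (n + 1))

-- B's frontier set and cumulative set after n iterations
def pvLvlB (L : List String) : Nat → PySem.Set String
  | 0 => [""]
  | n + 1 => PySem.Set.ofList (pvStep L (pvLvlB L n))

def pvResB (L : List String) : Nat → PySem.Set String
  | 0 => [""]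
  | n + 1 => PySem.Set.union (pvResB L n) (pvLvlB L (n + 1))

-- A's inner double loop is pvStep
theorem pvInner_eq_step (L : List String) (act : List String) :
    act.foldl (fun nuevo x => L.foldl (fun nuevo y => nuevo ++ [pvStrCat x y]) nuevo) [] =
      pvStep L act := by
  have h : ∀ (acc : List String) (x : String),
      L.foldl (fun nuevo y => nuevo ++ [pvStrCat x y]) acc = acc ++ L.map (fun y => pvStrCat x y) := by
    intro acc x
    exact PySem.List.foldl_append_singleton_eq_map (f := fun y => pvStrCat x y) (l := L) (acc := acc)
  calc act.foldl (fun nuevo x => L.foldl (fun nuevo y => nuevo ++ [pvStrCat x y]) nuevo) []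
      = act.foldl (fun nuevo x => nuevo ++ L.map (fun y => pvStrCat x y)) [] := by
        exact PySem.List.foldl_congr_mem act _ _ [] (fun acc x _ => h acc x)
    _ = pvStep L act := by
        simpa [pvStep] using
          PySem.List.foldl_append_eq_flatMap (g := fun x => L.map (fun y => pvStrCat x y))
            (l := act) (acc := ([] : List String))

-- the state of kleene_star's loop after n iterations
theorem pvKleeneState (L : List String) (n : Nat) :
    (PySem.List.pyRange 0 (n : Int) 1).foldl
      (fun (st : List String × List String) _ =>
        let nuevo := st.2.foldl
          (fun nuevo x => L.foldl (fun nuevo y => nuevo ++ [pvStrCat x y]) nuevo) []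
        (PySem.Set.ofList (st.1 ++ nuevo), nuevo))
      ([""], [""]) = (pvResA L n, pvLvlA L n) := by
  induction n with
  | zero => simp [PySem.List.pyRange_one_eq_nil, pvResA, pvLvlA]
  | succ n ih =>
    have hr : PySem.List.pyRange 0 ((n + 1 : Nat) : Int) 1 =
        PySem.List.pyRange 0 (n : Int) 1 ++ [(n : Int)] := by
      have := PySem.List.pyRange_one_succ_right (a := 0) (b := (n : Int)) (by exact_mod_cast Nat.zero_le n)
      push_cast
      simpa using this
    rw [hr, List.foldl_append, ih]
    simp only [List.foldl]
    rw [pvInner_eq_step]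
    simp [pvResA, pvLvlA]

theorem pvKleene_eq (L : List String) (n : Nat) :
    kleene_star L (n : Int) = pvResA L n := by
  unfold kleene_star
  rw [pvKleeneState]

-- B's frontier has the same members as A's
theorem pvMem_lvl (L : List String) (n : Nat) (s : String) :
    s ∈ pvLvlB L n ↔ s ∈ pvLvlA L n := by
  induction n generalizing s with
  | zero => simp [pvLvlA, pvLvlB]
  | succ n ih =>
    simp only [pvLvlA, pvLvlB, PySem.Set.mem_ofList, pvStep, List.mem_flatMap, List.mem_map]
    constructor
    · rintro ⟨x, hx, y, hy, rfl⟩; exact ⟨x, (ih x).mp hx, y, hy, rfl⟩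
    · rintro ⟨x, hx, y, hy, rfl⟩; exact ⟨x, (ih x).mpr hx, y, hy, rfl⟩

theorem pvMem_res (L : List String) (n : Nat) (s : String) :
    s ∈ pvResB L n ↔ s ∈ pvResA L n := by
  induction n with
  | zero => simp [pvResA, pvResB]
  | succ n ih =>
    simp only [pvResA, pvResB, PySem.Set.mem_ofList, PySem.Set.mem_union, List.mem_append]
    rw [ih, pvMem_lvl]

theorem pvNodup_resA (L : List String) (n : Nat) : (pvResA L n).Nodup := by
  cases n with
  | zero => simp [pvResA]
  | succ n => exact PySem.Set.nodup_ofList _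

theorem pvNodup_resB (L : List String) (n : Nat) : (pvResB L n).Nodup := by
  induction n with
  | zero => simp [pvResB]
  | succ n ih => exact PySem.Set.nodup_union _ _ ih

theorem pvPerm_res (L : List String) (n : Nat) : (pvResA L n).Perm (pvResB L n) :=
  (List.perm_ext_iff_of_nodup (pvNodup_resA L n) (pvNodup_resB L n)).mpr
    (fun s => (pvMem_res L n s).symm)

-- the (len, x) sort key as a lexicographic key into a linear order
theorem pvSorted2_eq_sorted_lex (xs : List String) :
    PySem.List.sorted2 xs (fun x => PySem.Str.len x) (fun x => x) false =
      PySem.List.sorted xs (fun x => toLex (PySem.Str.len x, x)) false := by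
  have hb : (fun a b : String =>
      decide (PySem.Str.len a < PySem.Str.len b) ||
        (!decide (PySem.Str.len b < PySem.Str.len a) && decide (a < b))) =
      fun a b : String => decide (toLex (PySem.Str.len a, a) < toLex (PySem.Str.len b, b)) := by
    funext a b
    rw [Bool.eq_iff_iff]
    simp only [Bool.or_eq_true, Bool.and_eq_true, Bool.not_eq_true', decide_eq_true_eq,
      decide_eq_false_iff_not, Prod.Lex.lt_iff, not_lt]
    constructor
    · rintro (h | ⟨h2, h3⟩)
      · exact Or.inl h
      · have : PySem.Str.len a = PySem.Str.len b ∨ PySem.Str.len a < PySem.Str.len b := by omega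
        rcases this with he | hl
        · exact Or.inr ⟨he, h3⟩
        · exact Or.inl hl
    · rintro (h | ⟨he, h3⟩)
      · exact Or.inl h
      · exact Or.inr ⟨le_of_eq he, h3⟩
  rw [PySem.List.sorted_eq_foldl_insertBy]
  show List.foldl (fun acc x => PySem.List.insertBy (fun a b : String =>
      decide (PySem.Str.len a < PySem.Str.len b) ||
        (!decide (PySem.Str.len b < PySem.Str.len a) && decide (a < b))) x acc) [] xs = _
  rw [hb]

theorem pvSorted_eq_of_perm (l1 l2 : List String) (h : l1.Perm l2) (hn : l1.Nodup) :
    PySem.List.sorted2 l1 (fun x => PySem.Str.len x) (fun x => x) false =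
      PySem.List.sorted2 l2 (fun x => PySem.Str.len x) (fun x => x) false := by
  rw [pvSorted2_eq_sorted_lex, pvSorted2_eq_sorted_lex]
  set key : String → Lex (Int × String) := fun x => toLex (PySem.Str.len x, x) with hkey
  have hperm : (PySem.List.sorted l1 key false).Perm l2 :=
    (PySem.List.sorted_perm (xs := l1) (key := key) (rev := false)).trans h
  have hnd : (PySem.List.sorted l1 key false).Nodup :=
    ((PySem.List.sorted_perm (xs := l1) (key := key) (rev := false)).nodup_iff).mpr hn
  have hpw : (PySem.List.sorted l1 key false).Pairwise (fun a b => key a < key b) := by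
    have h1 := PySem.List.sorted_pairwise (xs := l1) (key := key)
    have h2 : (PySem.List.sorted l1 key false).Pairwise (· ≠ ·) := List.Pairwise.imp (fun h => h) hnd
    refine (h1.and h2).imp ?_
    rintro a b ⟨hle, hne⟩
    refine lt_of_le_of_ne hle ?_
    intro hk
    apply hne
    have : (PySem.Str.len a, a) = (PySem.Str.len b, b) := by
      simpa [hkey] using hk
    exact (Prod.mk.injEq _ _ _ _ ▸ this).2
  exact (PySem.List.sorted_eq_of_perm_of_pairwise_lt l2 _ key hperm hpw).symm

-- B's main-loop state after m iterations carries A's accumulated lines plus B's two sets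
theorem pvMainState (L : List String) (m : Nat) :
    (PySem.List.pyRange 1 ((m : Int) + 1) 1).foldl
      (fun (st : List String × PySem.Set String × PySem.Set String) i =>
        let lineas := st.1
        let resultado := st.2.1
        let actual := st.2.2
        let actual := PySem.Set.ofList (actual.flatMap (fun x => L.map (fun y => pvStrCat x y)))
        let resultado := PySem.Set.union resultado actual
        let lineas := lineas ++ [pvStrCat "Iteracion: " (PySem.Int.toStr i)]
        let lineas := lineas ++ [pvStrCat "Cantidad: " (PySem.Int.toStr (PySem.Set.len resultado))]
        let lineas := lineas ++ ["Crecimiento:"]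
        let lineas :=
          (PySem.List.sorted2 resultado (fun s => PySem.Str.len s) (fun s => s) false).foldl
            (fun lineas cadena => lineas ++ [pvStrCat "  " (pvRepr cadena)]) lineas
        (lineas ++ [""], resultado, actual))
      ([], PySem.Set.ofList [""], PySem.Set.ofList [""]) =
    ((PySem.List.pyRange 1 ((m : Int) + 1) 1).foldl
      (fun (lineas : List String) i =>
        let resultado := kleene_star L i
        let resultado_ordenado :=
          PySem.List.sorted2 resultado (fun x => PySem.Str.len x) (fun x => x) false
        let lineas := lineas ++ [pvStrCat "Iteracion: " (PySem.Int.toStr i)]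
        let lineas := lineas ++ [pvStrCat "Cantidad: " (PySem.Int.toStr (resultado.length : Int))]
        let lineas := lineas ++ ["Crecimiento:"]
        let lineas := resultado_ordenado.foldl
          (fun lineas cadena => lineas ++ [pvStrCat "  " (pvRepr cadena)]) lineas
        lineas ++ [""])
      [], pvResB L m, pvLvlB L m) := by
  induction m with
  | zero =>
    have hnil : PySem.List.pyRange 1 ((0 : Nat) + 1 : Int) 1 = [] := by
      apply PySem.List.pyRange_one_eq_nil; norm_num
    rw [hnil]
    simp [pvResB, pvLvlB, PySem.Set.ofList_eq_self_of_nodup]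
  | succ m ih =>
    have h0 : (((m + 1 : Nat) : Int) + 1) = ((m : Int) + 1) + 1 := by push_cast; ring
    have hr : PySem.List.pyRange 1 (((m + 1 : Nat) : Int) + 1) 1 =
        PySem.List.pyRange 1 ((m : Int) + 1) 1 ++ [(m : Int) + 1] := by
      rw [h0]; exact PySem.List.pyRange_one_succ_right (by omega)
    have hi : ((m : Int) + 1) = ((m + 1 : Nat) : Int) := by push_cast; ring
    have hk : kleene_star L ((m : Int) + 1) = pvResA L (m + 1) := by
      rw [hi, pvKleene_eq]
    have hstepB : PySem.Set.ofList ((pvLvlB L m).flatMap (fun x => L.map (fun y => pvStrCat x y))) =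
        pvLvlB L (m + 1) := rfl
    have hresB : PySem.Set.union (pvResB L m) (pvLvlB L (m + 1)) = pvResB L (m + 1) := rfl
    have hlen : PySem.Set.len (pvResB L (m + 1)) = ((pvResA L (m + 1)).length : Int) := by
      simp [PySem.Set.len, (pvPerm_res L (m + 1)).length_eq]
    have hsort : PySem.List.sorted2 (pvResB L (m + 1)) (fun s => PySem.Str.len s) (fun s => s) false =
        PySem.List.sorted2 (pvResA L (m + 1)) (fun x => PySem.Str.len x) (fun x => x) false :=
      (pvSorted_eq_of_perm _ _ (pvPerm_res L (m + 1)) (pvNodup_resA L (m + 1))).symm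
    rw [hr, List.foldl_append, List.foldl_append, ih]
    simp only [List.foldl, hstepB, hresB, hlen, hsort, hk]

-- ===== VERDICT (by name: the statement is the Claim_ definition above) =====
theorem analizar_crecimiento_spec : Claim_equal_analizar_crecimiento := by
  intro L max_iter _
  unfold Spec_analizar_crecimiento
  by_cases h : max_iter < 1
  · have hnil : PySem.List.pyRange 1 (max_iter + 1) 1 = [] :=
      PySem.List.pyRange_one_eq_nil (by omega)
    simp [analizar_crecimiento, analizar_crecimiento_alt, hnil]
  · obtain ⟨m, hm⟩ : ∃ m : Nat, max_iter = (m : Int) := ⟨max_iter.toNat, by omega⟩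
    subst hm
    unfold analizar_crecimiento analizar_crecimiento_alt
    rw [pvMainState]
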